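-- pv_equiv track=rewrite | github.com/satvikvedala/GFG-solutions | Problem of the day/Right most non zero digit.py | rightmostNonZeroDigit
-- ===== SOURCE A (Python) =====
-- def rightmostNonZeroDigit (N, A):
--     # code here
--     c5 = 0
--     c2 = 0
--     for i in range(N):
--         temp = A[i]
--         while temp>0 and temp%5 == 0:
--             temp = temp//5
--             c5+=1
--     for i in range(N):
--         temp = A[i]
--         while temp>0 and temp%2 == 0:
--             temp = temp//2
--             c2+=1
--     prod = 1
--     for i in range(N):
--         prod = prod*A[i]
--     res = 10**min(c2,c5)
--     prod = prod//res
--     if prod%10!=0: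
--         return prod%10
--     return -1
-- ===== SOURCE B (Python) =====
-- def rightmostNonZeroDigit(N, A):
--     # Single pass: count the factors of 2 and 5 collected from the elements and
--     # keep the remaining cofactor of the product modulo 10; reconstruct the
--     # answer with modular exponentiation instead of building the full product.
--     c2 = c5 = 0
--     r = 1
--     for i in range(N):
--         x = A[i]
--         while x > 0 and x % 5 == 0:
--             x //= 5
--             c5 += 1
--         while x > 0 and x % 2 == 0:
--             x //= 2
--             c2 += 1
--         r = r * (x % 10) % 10
--     m = min(c2, c5)
--     d = pow(2, c2 - m, 10) * pow(5, c5 - m, 10) * r % 10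
--     return d if d != 0 else -1
-- ===== Notes on version B (the rewrite author's own statement) =====
-- stated objective: faster
-- what changed: Replaces the three passes and the full big-integer product (quadratic in total bit size) by a single pass that keeps the counts of factors 2 and 5 together with the remaining cofactor of the product modulo 10, reconstructing the rightmost nonzero digit with modular exponentiation; Pre_ only excludes N > len(A), where A raises IndexError.
import Mathlib
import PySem

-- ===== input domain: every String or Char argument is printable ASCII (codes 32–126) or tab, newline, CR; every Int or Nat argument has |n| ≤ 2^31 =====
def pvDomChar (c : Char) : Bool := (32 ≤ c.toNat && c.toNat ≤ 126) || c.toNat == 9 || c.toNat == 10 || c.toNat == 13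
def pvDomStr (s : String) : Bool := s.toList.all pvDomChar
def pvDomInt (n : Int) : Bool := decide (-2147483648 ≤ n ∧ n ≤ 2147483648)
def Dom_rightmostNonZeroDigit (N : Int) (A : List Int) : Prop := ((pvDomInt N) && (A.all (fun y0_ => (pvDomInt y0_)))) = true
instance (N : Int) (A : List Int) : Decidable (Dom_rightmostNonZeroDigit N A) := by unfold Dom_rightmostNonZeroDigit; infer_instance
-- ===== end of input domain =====

-- B replaces A's three passes and full big-integer product by one pass keeping the
-- factor-2/5 counts and the remaining cofactor of the product mod 10, finishing with
-- modular exponentiation (objective: faster).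

-- ===== PORT A =====
-- the inner 'while temp>0 and temp%5 == 0' loop of A's first pass
def stripA5 (temp c5 : Int) : Int :=
  if h : 0 < temp ∧ PySem.Int.mod temp 5 = 0 then
    stripA5 (PySem.Int.floordiv temp 5) (c5 + 1)
  else c5
termination_by temp.toNat
decreasing_by
  rw [PySem.Int.floordiv_eq_ediv_of_pos (by norm_num)]
  rw [PySem.Int.mod_eq_emod_of_pos (by norm_num)] at h
  omega

-- the inner 'while temp>0 and temp%2 == 0' loop of A's second pass
def stripA2 (temp c2 : Int) : Int :=
  if h : 0 < temp ∧ PySem.Int.mod temp 2 = 0 then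
    stripA2 (PySem.Int.floordiv temp 2) (c2 + 1)
  else c2
termination_by temp.toNat
decreasing_by
  rw [PySem.Int.floordiv_eq_ediv_of_pos (by norm_num)]
  rw [PySem.Int.mod_eq_emod_of_pos (by norm_num)] at h
  omega

def rightmostNonZeroDigit (N : Int) (A : List Int) : Int :=
  let idxs := PySem.List.pyRange 0 N 1
  let c5 := idxs.foldl (fun c i => stripA5 (PySem.List.pyGetD A i 0) c) 0
  let c2 := idxs.foldl (fun c i => stripA2 (PySem.List.pyGetD A i 0) c) 0
  let prod := idxs.foldl (fun p i => p * PySem.List.pyGetD A i 0) 1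
  -- 10 ** min(c2,c5): the exponent is a count, hence ≥ 0, so Nat power is exact
  let res : Int := 10 ^ (min c2 c5).toNat
  let prod2 := PySem.Int.floordiv prod res
  if PySem.Int.mod prod2 10 ≠ 0 then PySem.Int.mod prod2 10 else -1

-- ===== PORT B =====
-- Source B's 'while x > 0 and x % 5 == 0' loop (returns the stripped value and the count)
def stripB5 (x a : Int) : Int × Int :=
  if h : 0 < x ∧ PySem.Int.mod x 5 = 0 then
    stripB5 (PySem.Int.floordiv x 5) (a + 1)
  else (x, a)
termination_by x.toNat
decreasing_by
  rw [PySem.Int.floordiv_eq_ediv_of_pos (by norm_num)]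
  rw [PySem.Int.mod_eq_emod_of_pos (by norm_num)] at h
  omega

-- Source B's 'while x > 0 and x % 2 == 0' loop
def stripB2 (x a : Int) : Int × Int :=
  if h : 0 < x ∧ PySem.Int.mod x 2 = 0 then
    stripB2 (PySem.Int.floordiv x 2) (a + 1)
  else (x, a)
termination_by x.toNat
decreasing_by
  rw [PySem.Int.floordiv_eq_ediv_of_pos (by norm_num)]
  rw [PySem.Int.mod_eq_emod_of_pos (by norm_num)] at h
  omega

-- one iteration of Source B's single loop; state = (c2, c5, r)
def bStep (st : Int × Int × Int) (x : Int) : Int × Int × Int :=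
  let p5 := stripB5 x 0
  let p2 := stripB2 p5.1 0
  (st.1 + p2.2, st.2.1 + p5.2, PySem.Int.mod (st.2.2 * PySem.Int.mod p2.1 10) 10)

def rightmostNonZeroDigit_alt (N : Int) (A : List Int) : Int :=
  let st := (PySem.List.pyRange 0 N 1).foldl
      (fun st i => bStep st (PySem.List.pyGetD A i 0)) (0, 0, 1)
  let m := min st.1 st.2.1
  -- pow(2, c2-m, 10): the exponent is ≥ 0 here, so Nat power reduced mod 10 is exact
  let d := PySem.Int.mod ((2:Int) ^ (st.1 - m).toNat % 10 * ((5:Int) ^ (st.2.1 - m).toNat % 10) * st.2.2) 10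
  if d ≠ 0 then d else -1

-- ===== PRECONDITION & SPEC =====
-- Pre_ excludes exactly the inputs where A raises IndexError (N larger than len(A)).
def Pre_rightmostNonZeroDigit (N : Int) (A : List Int) : Prop := N ≤ (A.length : Int)
instance (N : Int) (A : List Int) : Decidable (Pre_rightmostNonZeroDigit N A) := by
  unfold Pre_rightmostNonZeroDigit; infer_instance

def pvWitness_rightmostNonZeroDigit : Int × List Int := (2, [4, 5])

def Spec_rightmostNonZeroDigit (N : Int) (A : List Int) (out : Int) : Prop := out = rightmostNonZeroDigit_alt N A
instance (N : Int) (A : List Int) (out : Int) : Decidable (Spec_rightmostNonZeroDigit N A out) := by unfold Spec_rightmostNonZeroDigit; infer_instance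

-- ===== CLAIM (what is proved, stated in full; the proofs are below) =====
def Claim_equal_rightmostNonZeroDigit : Prop := ∀ (N : Int) (A : List Int), Dom_rightmostNonZeroDigit N A → Pre_rightmostNonZeroDigit N A → Spec_rightmostNonZeroDigit N A (rightmostNonZeroDigit N A)

-- ===== LEMMAS AND PROOFS =====

theorem pv_foldl_range_take {β : Type} (f : β → Int → β) (A : List Int) :
    ∀ (n : ℕ), n ≤ A.length → ∀ (init : β),
      (List.range n).foldl (fun s k => f s (A.getD k 0)) init = (A.take n).foldl f init := by
  intro n
  induction n with
  | zero => intro _ init; simp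
  | succ n ih =>
    intro h init
    have hlt : n < A.length := by omega
    rw [List.range_succ, List.foldl_append, List.take_add_one, List.foldl_append,
        ih (by omega) init]
    simp [List.getElem?_eq_getElem hlt, List.getD]

theorem pv_foldl_pyGetD_take {β : Type} (f : β → Int → β) (A : List Int) (N : Int) (init : β)
    (h : N ≤ (A.length : Int)) :
    (PySem.List.pyRange 0 N 1).foldl (fun s i => f s (PySem.List.pyGetD A i 0)) init
      = (A.take N.toNat).foldl f init := by
  rw [PySem.List.pyRange_one, List.foldl_map,
      show (N - 0).toNat = N.toNat by omega,
      ← pv_foldl_range_take f A N.toNat (by omega) init]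
  simp

theorem pv_prime_two : Prime (2 : Int) := Int.prime_two

theorem pv_prime_five : Prime (5 : Int) := by
  rw [Int.prime_iff_natAbs_prime]; norm_num

-- p^k * y = p^k' * y' with y, y' not divisible by the prime p forces k = k'
theorem pv_pow_mul_inj {p : Int} (hp : Prime p) :
    ∀ (k k' : ℕ) (y y' : Int), ¬ p ∣ y → ¬ p ∣ y' → p ^ k * y = p ^ k' * y' → k = k' := by
  intro k
  induction k with
  | zero =>
    intro k' y y' hy hy' he
    cases k' with
    | zero => rfl
    | succ m =>
      exfalso; apply hy
      rw [pow_zero, one_mul] at he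
      exact he ▸ Dvd.intro (p ^ m * y') (by ring)
  | succ n ih =>
    intro k' y y' hy hy' he
    cases k' with
    | zero =>
      exfalso; apply hy'
      rw [pow_zero, one_mul] at he
      exact he ▸ Dvd.intro (p ^ n * y) (by ring)
    | succ m =>
      have hc : p * (p ^ n * y) = p * (p ^ m * y') := by
        rw [← mul_assoc, ← pow_succ', ← mul_assoc, ← pow_succ']; exact he
      have := ih m y y' hy hy' (mul_left_cancel₀ hp.ne_zero hc)
      omega

theorem pv_not_dvd_factor {p q : Int} (hp : Prime p) (hpq : ¬ p ∣ q) (b : ℕ) {z : Int}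
    (hz : ¬ p ∣ z) : ¬ p ∣ q ^ b * z := by
  intro hd
  rcases hp.dvd_mul.mp hd with h1 | h1
  · exact hpq (hp.dvd_of_dvd_pow h1)
  · exact hz h1

theorem stripA5_spec (x c : Int) : 0 < x →
    ∃ (k : ℕ) (y : Int), 0 < y ∧ ¬((5:Int) ∣ y) ∧ x = 5 ^ k * y ∧ stripA5 x c = c + k := by
  induction x, c using stripA5.induct with
  | case1 x c h ih =>
    intro hx
    have hfd : PySem.Int.floordiv x 5 = x / 5 := PySem.Int.floordiv_eq_ediv_of_pos (by norm_num)
    have hm : x % 5 = 0 := by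
      rw [← PySem.Int.mod_eq_emod_of_pos (by norm_num)]; exact h.2
    obtain ⟨k, y, hy, hdvd, hxe, hs⟩ := ih (by rw [hfd]; omega)
    refine ⟨k + 1, y, hy, hdvd, ?_, ?_⟩
    · rw [hfd] at hxe
      have hx5 : x = 5 * (x / 5) := by omega
      rw [pow_succ', mul_assoc, ← hxe]; exact hx5
    · rw [stripA5]; simp only [h, and_self, dite_true, hs]; push_cast; ring
  | case2 x c h =>
    intro hx
    refine ⟨0, x, hx, ?_, by ring, by rw [stripA5, dif_neg h]; simp⟩
    intro hdvd
    apply h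
    refine ⟨hx, ?_⟩
    rw [PySem.Int.mod_eq_emod_of_pos (by norm_num)]
    omega

theorem stripA2_spec (x c : Int) : 0 < x →
    ∃ (k : ℕ) (y : Int), 0 < y ∧ ¬((2:Int) ∣ y) ∧ x = 2 ^ k * y ∧ stripA2 x c = c + k := by
  induction x, c using stripA2.induct with
  | case1 x c h ih =>
    intro hx
    have hfd : PySem.Int.floordiv x 2 = x / 2 := PySem.Int.floordiv_eq_ediv_of_pos (by norm_num)
    have hm : x % 2 = 0 := by
      rw [← PySem.Int.mod_eq_emod_of_pos (by norm_num)]; exact h.2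
    obtain ⟨k, y, hy, hdvd, hxe, hs⟩ := ih (by rw [hfd]; omega)
    refine ⟨k + 1, y, hy, hdvd, ?_, ?_⟩
    · rw [hfd] at hxe
      have hx5 : x = 2 * (x / 2) := by omega
      rw [pow_succ', mul_assoc, ← hxe]; exact hx5
    · rw [stripA2]; simp only [h, and_self, dite_true, hs]; push_cast; ring
  | case2 x c h =>
    intro hx
    refine ⟨0, x, hx, ?_, by ring, by rw [stripA2, dif_neg h]; simp⟩
    intro hdvd
    apply h
    refine ⟨hx, ?_⟩
    rw [PySem.Int.mod_eq_emod_of_pos (by norm_num)]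
    omega

theorem stripA5_nonpos (x c : Int) (hx : ¬ 0 < x) : stripA5 x c = c := by
  unfold stripA5; simp [hx]

theorem stripA2_nonpos (x c : Int) (hx : ¬ 0 < x) : stripA2 x c = c := by
  unfold stripA2; simp [hx]

theorem stripB5_nonpos (x a : Int) (hx : ¬ 0 < x) : stripB5 x a = (x, a) := by
  unfold stripB5; simp [hx]

theorem stripB2_nonpos (x a : Int) (hx : ¬ 0 < x) : stripB2 x a = (x, a) := by
  unfold stripB2; simp [hx]

theorem stripB5_spec (x a : Int) : 0 < x →
    ∃ (k : ℕ) (y : Int), 0 < y ∧ ¬((5:Int) ∣ y) ∧ x = 5 ^ k * y ∧ stripB5 x a = (y, a + k) := by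
  induction x, a using stripB5.induct with
  | case1 x a h ih =>
    intro hx
    have hfd : PySem.Int.floordiv x 5 = x / 5 := PySem.Int.floordiv_eq_ediv_of_pos (by norm_num)
    have hm : x % 5 = 0 := by
      rw [← PySem.Int.mod_eq_emod_of_pos (by norm_num)]; exact h.2
    obtain ⟨k, y, hy, hdvd, hxe, hs⟩ := ih (by rw [hfd]; omega)
    refine ⟨k + 1, y, hy, hdvd, ?_, ?_⟩
    · rw [hfd] at hxe
      have hx' : x = 5 * (x / 5) := by omega
      rw [pow_succ', mul_assoc, ← hxe]; exact hx'
    · rw [stripB5]; simp only [h, and_self, dite_true, hs]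
      congr 1; push_cast; ring
  | case2 x a h =>
    intro hx
    refine ⟨0, x, hx, ?_, by ring, by rw [stripB5, dif_neg h]; simp⟩
    intro hdvd
    apply h
    refine ⟨hx, ?_⟩
    rw [PySem.Int.mod_eq_emod_of_pos (by norm_num)]
    omega

theorem stripB2_spec (x a : Int) : 0 < x →
    ∃ (k : ℕ) (y : Int), 0 < y ∧ ¬((2:Int) ∣ y) ∧ x = 2 ^ k * y ∧ stripB2 x a = (y, a + k) := by
  induction x, a using stripB2.induct with
  | case1 x a h ih =>
    intro hx
    have hfd : PySem.Int.floordiv x 2 = x / 2 := PySem.Int.floordiv_eq_ediv_of_pos (by norm_num)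
    have hm : x % 2 = 0 := by
      rw [← PySem.Int.mod_eq_emod_of_pos (by norm_num)]; exact h.2
    obtain ⟨k, y, hy, hdvd, hxe, hs⟩ := ih (by rw [hfd]; omega)
    refine ⟨k + 1, y, hy, hdvd, ?_, ?_⟩
    · rw [hfd] at hxe
      have hx' : x = 2 * (x / 2) := by omega
      rw [pow_succ', mul_assoc, ← hxe]; exact hx'
    · rw [stripB2]; simp only [h, and_self, dite_true, hs]
      congr 1; push_cast; ring
  | case2 x a h =>
    intro hx
    refine ⟨0, x, hx, ?_, by ring, by rw [stripB2, dif_neg h]; simp⟩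
    intro hdvd
    apply h
    refine ⟨hx, ?_⟩
    rw [PySem.Int.mod_eq_emod_of_pos (by norm_num)]
    omega

theorem pv_res_mod (R z : Int) :
    PySem.Int.mod (R % 10 * PySem.Int.mod z 10) 10 = R * z % 10 := by
  rw [PySem.Int.mod_eq_emod_of_pos (by norm_num), PySem.Int.mod_eq_emod_of_pos (by norm_num),
      Int.mul_emod R z 10]

-- the coupling invariant between A's three accumulators and B's state (c2, c5, r)
def BRel (c5A c2A pA : Int) (st : Int × Int × Int) : Prop :=
  ∃ (a b : ℕ) (K : Int), c2A = a ∧ c5A = b ∧ st.1 = a ∧ st.2.1 = b ∧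
    pA = 2 ^ a * 5 ^ b * K ∧ st.2.2 = K % 10

-- a positive x factors as 2^e2 * 5^e5 * y with y coprime to 10, and all four loops agree on it
theorem b_strip_core (x : Int) (hx : 0 < x) :
    ∃ (e2 e5 : ℕ) (y : Int), 0 < y ∧ ¬((2:Int) ∣ y) ∧ ¬((5:Int) ∣ y) ∧
      x = 2 ^ e2 * 5 ^ e5 * y ∧
      (stripB5 x 0).2 = (e5 : Int) ∧
      (stripB2 (stripB5 x 0).1 0).1 = y ∧
      (stripB2 (stripB5 x 0).1 0).2 = (e2 : Int) ∧
      (∀ c, stripA5 x c = c + e5) ∧ (∀ c, stripA2 x c = c + e2) := by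
  obtain ⟨e5, y5, hy5pos, hy5nd, hxeq, hsB5⟩ := stripB5_spec x 0 hx
  obtain ⟨e2, y, hypos, hynd2, hy5eq, hsB2⟩ := stripB2_spec y5 0 hy5pos
  have hynd5 : ¬((5:Int) ∣ y) := fun hd => hy5nd (hy5eq ▸ Dvd.dvd.mul_left hd (2 ^ e2))
  have hxfull : x = 2 ^ e2 * 5 ^ e5 * y := by rw [hxeq, hy5eq]; ring
  have hfst : (stripB5 x 0).1 = y5 := by rw [hsB5]
  refine ⟨e2, e5, y, hypos, hynd2, hynd5, hxfull, by rw [hsB5]; simp, by rw [hfst, hsB2],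
          by rw [hfst, hsB2]; simp, ?_, ?_⟩
  · intro c
    obtain ⟨k5, w5, hw5pos, hw5nd, hxe5, hs5⟩ := stripA5_spec x c hx
    have hk5 : k5 = e5 := by
      refine pv_pow_mul_inj pv_prime_five k5 e5 w5 (2 ^ e2 * y) hw5nd ?_ ?_
      · exact pv_not_dvd_factor pv_prime_five (by decide) e2 hynd5
      · rw [← hxe5, hxfull]; ring
    rw [hs5, hk5]
  · intro c
    obtain ⟨k2, w2, hw2pos, hw2nd, hxe2, hs2⟩ := stripA2_spec x c hx
    have hk2 : k2 = e2 := by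
      refine pv_pow_mul_inj pv_prime_two k2 e2 w2 (5 ^ e5 * y) hw2nd ?_ ?_
      · exact pv_not_dvd_factor pv_prime_two (by decide) e5 hynd2
      · rw [← hxe2, hxfull]; ring
    rw [hs2, hk2]

theorem bStep_rel (c5A c2A pA : Int) (st : Int × Int × Int) (x : Int)
    (h : BRel c5A c2A pA st) :
    BRel (stripA5 x c5A) (stripA2 x c2A) (pA * x) (bStep st x) := by
  obtain ⟨a, b, K, h2, h5, s2, s5, hp, hr⟩ := h
  by_cases hx : 0 < x
  · obtain ⟨e2, e5, y, hypos, hynd2, hynd5, hxf, eB5, eB2v, eB2c, hA5, hA2⟩ := b_strip_core x hx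
    refine ⟨a + e2, b + e5, K * y, ?_, ?_, ?_, ?_, ?_, ?_⟩
    · rw [hA2 c2A, h2]; push_cast; ring
    · rw [hA5 c5A, h5]; push_cast; ring
    · simp only [bStep, eB2c, s2]; push_cast; ring
    · simp only [bStep, eB5, s5]; push_cast; ring
    · rw [hp, hxf, pow_add, pow_add]; ring
    · simp only [bStep, eB2v, hr]
      rw [pv_res_mod K y]
  · rw [stripA5_nonpos x c5A hx, stripA2_nonpos x c2A hx]
    refine ⟨a, b, K * x, h2, h5, ?_, ?_, by rw [hp]; ring, ?_⟩
    · simp only [bStep, stripB5_nonpos x 0 hx, stripB2_nonpos x 0 hx, s2]; ring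
    · simp only [bStep, stripB5_nonpos x 0 hx, stripB2_nonpos x 0 hx, s5]; ring
    · simp only [bStep, stripB5_nonpos x 0 hx, stripB2_nonpos x 0 hx, hr]
      rw [pv_res_mod K x]

theorem b_fold_rel : ∀ (l : List Int) (c5A c2A pA : Int) (st : Int × Int × Int),
    BRel c5A c2A pA st →
    BRel (l.foldl (fun c x => stripA5 x c) c5A) (l.foldl (fun c x => stripA2 x c) c2A)
      (l.foldl (· * ·) pA) (l.foldl bStep st) := by
  intro l
  induction l with
  | nil => intro _ _ _ _ h; exact h
  | cons x t ih => intro c5A c2A pA st h; exact ih _ _ _ _ (bStep_rel _ _ _ _ x h)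

theorem b_final (c5A c2A pA : Int) (st : Int × Int × Int) (h : BRel c5A c2A pA st) :
    (if PySem.Int.mod (PySem.Int.floordiv pA ((10:Int) ^ (min c2A c5A).toNat)) 10 ≠ 0
       then PySem.Int.mod (PySem.Int.floordiv pA ((10:Int) ^ (min c2A c5A).toNat)) 10 else -1)
    = (let m := min st.1 st.2.1
       let d := PySem.Int.mod ((2:Int) ^ (st.1 - m).toNat % 10 * ((5:Int) ^ (st.2.1 - m).toNat % 10) * st.2.2) 10
       if d ≠ 0 then d else -1) := by
  obtain ⟨a, b, K, h2, h5, s2, s5, hp, hr⟩ := h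
  subst h2; subst h5
  have hmin : (min (a:Int) (b:Int)).toNat = min a b := by omega
  set m : ℕ := min a b with hm
  set Q : Int := 2 ^ (a - m) * 5 ^ (b - m) * K with hQ
  have hres : (0:Int) < 10 ^ m := by positivity
  have hsplit : pA = Q * 10 ^ m := by
    rw [hp, hQ]
    have h10 : (10:Int) ^ m = 2 ^ m * 5 ^ m := by rw [← mul_pow]; norm_num
    have ha : a = (a - m) + m := by omega
    have hb : b = (b - m) + m := by omega
    rw [h10]
    conv_lhs => rw [ha, hb]
    rw [pow_add, pow_add]; ring
  have hdiv : PySem.Int.floordiv pA ((10:Int) ^ m) = Q := by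
    rw [PySem.Int.floordiv_eq_ediv_of_pos hres, hsplit,
        Int.mul_ediv_cancel _ (ne_of_gt hres)]
  have he2 : ((st.1 : Int) - min st.1 st.2.1).toNat = a - m := by
    rw [s2, s5]; omega
  have he5 : ((st.2.1 : Int) - min st.1 st.2.1).toNat = b - m := by
    rw [s2, s5]; omega
  simp only [hmin, hdiv, he2, he5, hr]
  rw [PySem.Int.mod_eq_emod_of_pos (by norm_num), PySem.Int.mod_eq_emod_of_pos (by norm_num)]
  have hd : (2:Int) ^ (a - m) % 10 * ((5:Int) ^ (b - m) % 10) * (K % 10) % 10 = Q % 10 := by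
    rw [hQ]; simp [Int.mul_emod]
  rw [hd]

-- ===== VERDICT (by name: the statement is the Claim_ definition above) =====
theorem rightmostNonZeroDigit_spec : Claim_equal_rightmostNonZeroDigit := by
  intro N A _ hpre
  unfold Spec_rightmostNonZeroDigit
  simp only [rightmostNonZeroDigit, rightmostNonZeroDigit_alt]
  rw [pv_foldl_pyGetD_take (fun c x => stripA5 x c) A N 0 hpre,
      pv_foldl_pyGetD_take (fun c x => stripA2 x c) A N 0 hpre,
      pv_foldl_pyGetD_take (fun p x => p * x) A N 1 hpre,
      pv_foldl_pyGetD_take bStep A N (0, 0, 1) hpre]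
  have h0 : BRel 0 0 1 (0, 0, 1) := ⟨0, 0, 1, by norm_num⟩
  exact b_final _ _ _ _ (b_fold_rel (A.take N.toNat) 0 0 1 _ h0)
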